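-- pv_equiv track=rewrite | github.com/InKyuHwang001/Algorithm | 프로그래머스/Python/lev3/숫자게임.py | solution
-- ===== SOURCE A (Python) =====
-- def solution(A, B):
--     ans = 0
--     A.sort(reverse = True)
--     B.sort(reverse = True)
--     for a in A:
--         if a >= B[0]:
--             continue
--         ans += 1
--         del B[0]
--     return ans
-- ===== SOURCE B (Python) =====
-- def solution(A, B):
--     # Two-pointer over the descending-sorted lists instead of repeated del B[0].
--     A.sort(reverse=True)
--     B.sort(reverse=True)
--     ans = 0
--     j = 0
--     for a in A:
--         if j < len(B) and B[j] > a: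
--             ans += 1
--             j += 1
--     return ans
-- ===== Notes on version B (the rewrite author's own statement) =====
-- stated objective: faster
-- what changed: Replaces the repeated O(n) del B[0] on a shrinking list with a single advancing index j over the sorted B, so the scan after sorting is one O(n) pass.
-- outside the precondition, e.g. on solution([5, 6], [1]): A returns 0, B returns 0; on solution([1, 2], [5]): A raises IndexError, B returns 1
import Mathlib
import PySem

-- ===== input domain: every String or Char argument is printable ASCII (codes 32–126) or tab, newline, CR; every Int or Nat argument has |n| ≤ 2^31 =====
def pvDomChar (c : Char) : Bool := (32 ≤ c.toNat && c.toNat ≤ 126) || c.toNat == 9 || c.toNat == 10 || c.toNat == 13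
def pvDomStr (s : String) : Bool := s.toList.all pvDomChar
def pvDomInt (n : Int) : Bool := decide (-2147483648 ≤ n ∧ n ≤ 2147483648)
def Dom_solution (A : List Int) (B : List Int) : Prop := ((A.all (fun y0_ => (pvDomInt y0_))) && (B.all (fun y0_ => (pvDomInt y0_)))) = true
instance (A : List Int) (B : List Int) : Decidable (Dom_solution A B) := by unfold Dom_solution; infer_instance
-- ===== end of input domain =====

-- B replaces A's repeated `del B[0]` on a shrinking list with an advancing index over sorted B
-- (one O(n) pass after sorting). Note: A mutates its arguments (sorts both, deletes from B);
-- B sorts both in place too but does not delete from B; the equivalence proved is about the return value.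


-- ===== PORT A =====
-- the for-loop of A: state = (ans, current B list); `del B[0]` drops the head
def solutionLoop : List Int → Int → List Int → Int
  | [], ans, _ => ans
  | a :: rest, ans, Bs =>
    match Bs with
    | [] => ans  -- Python raises IndexError at `B[0]` here; excluded by Pre_solution
    | b :: brest =>
      if a ≥ b then solutionLoop rest ans (b :: brest)
      else solutionLoop rest (ans + 1) brest

def solution (A : List Int) (B : List Int) : Int :=
  solutionLoop (PySem.List.sorted A (fun x => x) true) 0 (PySem.List.sorted B (fun x => x) true)

-- ===== PORT B =====
-- the for-loop of B: state = (ans, index j into the sorted B)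
def solutionAltLoop (Bs : List Int) : List Int → Int → Nat → Int
  | [], ans, _ => ans
  | a :: rest, ans, j =>
    if h : j < Bs.length then
      if Bs[j] > a then solutionAltLoop Bs rest (ans + 1) (j + 1)
      else solutionAltLoop Bs rest ans j
    else solutionAltLoop Bs rest ans j

def solution_alt (A : List Int) (B : List Int) : Int :=
  let Bs := PySem.List.sorted B (fun x => x) true
  solutionAltLoop Bs (PySem.List.sorted A (fun x => x) true) 0 0

-- ===== PRECONDITION & SPEC =====
-- Pre_ excludes inputs with len(A) > len(B): there A may exhaust B and raise IndexError at B[0]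
-- (whether it actually raises depends on the values, so some returning inputs are excluded too;
-- on those A and B agree when A returns — see claim.json cites).
def Pre_solution (A : List Int) (B : List Int) : Prop := A.length ≤ B.length
instance (A : List Int) (B : List Int) : Decidable (Pre_solution A B) := by unfold Pre_solution; infer_instance

def pvWitness_solution : List Int × List Int := ([3, 1], [2, 4])

def Spec_solution (A : List Int) (B : List Int) (out : Int) : Prop := out = solution_alt A B
instance (A : List Int) (B : List Int) (out : Int) : Decidable (Spec_solution A B out) := by unfold Spec_solution; infer_instance

-- ===== CLAIM (what is proved, stated in full; the proofs are below) =====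
def Claim_equal_solution : Prop := ∀ (A : List Int) (B : List Int), Dom_solution A B → Pre_solution A B → Spec_solution A B (solution A B)

-- ===== LEMMAS AND PROOFS =====

-- Loop correspondence: A's remaining B list is the drop-j suffix of the fixed sorted B.
theorem loop_eq (Bs : List Int) :
    ∀ (as : List Int) (ans : Int) (j : Nat), as.length + j ≤ Bs.length →
      solutionLoop as ans (Bs.drop j) = solutionAltLoop Bs as ans j := by
  intro as
  induction as with
  | nil => intro ans j _; simp [solutionLoop, solutionAltLoop]
  | cons a rest ih =>
    intro ans j hle
    have hj : j < Bs.length := by simp at hle; omega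
    rw [List.drop_eq_getElem_cons hj]
    simp only [solutionLoop, solutionAltLoop, dif_pos hj]
    by_cases hc : a ≥ Bs[j]
    · rw [if_pos hc, if_neg (by omega), ← List.drop_eq_getElem_cons hj]
      exact ih ans j (by simp at hle ⊢; omega)
    · rw [if_neg hc, if_pos (by omega)]
      exact ih (ans + 1) (j + 1) (by simp at hle ⊢; omega)

-- ===== VERDICT (by name: the statement is the Claim_ definition above) =====
theorem solution_spec : Claim_equal_solution := by
  intro A B _ hpre
  unfold Spec_solution solution solution_alt
  have h := loop_eq (PySem.List.sorted B (fun x => x) true)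
    (PySem.List.sorted A (fun x => x) true) 0 0
  rw [← h]
  · simp
  · simp [PySem.List.length_sorted]
    exact hpre
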